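-- pv_equiv track=rewrite | github.com/Divyansh3021/Data-Structures-and-Algorithm | 1-D Dynamic Programming/BuiltTeamWithNoConflicts.py | bestTeamScore
-- ===== SOURCE A (Python) =====
-- from typing import List
--
-- def bestTeamScore(scores: List[int], ages: List[int]) -> int:
--     team = [[scores[i], ages[i]] for i in range(len(scores))]
--     team.sort()
--     dp = [team[i][0] for i in range(len(scores))]
--
--     for i in range(len(team)):
--         mScore, mAge = team[i]
--         for j in range(i):
--             score, age = team[j]
--             if mAge >= age:
--                 dp[i] = max(dp[i], mScore + dp[j])
--     return max(dp)
-- ===== SOURCE B (Python) =====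
-- from typing import List
--
-- def bestTeamScore(scores: List[int], ages: List[int]) -> int:
--     # Pareto frontier of (age, dp): ages strictly increasing, dp values strictly
--     # increasing; only positive dp values are kept (a non-positive dp never helps).
--     frontier = []  # list of (age, dp) pairs
--     best = None
--     for s, a in sorted(zip(scores, ages)):
--         q = 0
--         for ag, v in frontier:
--             if ag <= a and v > q:
--                 q = v
--         dp = s + q
--         if best is None or dp > best:
--             best = dp
--         if dp > q:
--             frontier = [p for p in frontier if p[0] < a] + [(a, dp)] + [p for p in frontier if p[1] > dp]
--     return best
-- ===== Notes on version B (the rewrite author's own statement) =====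
-- stated objective: faster
-- what changed: Replaces A's quadratic rescan of all previously processed players by a single pass over the sorted players that maintains a pruned Pareto frontier of (age, best-chain-score) states plus a running maximum, querying and updating only the frontier.
import Mathlib
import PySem

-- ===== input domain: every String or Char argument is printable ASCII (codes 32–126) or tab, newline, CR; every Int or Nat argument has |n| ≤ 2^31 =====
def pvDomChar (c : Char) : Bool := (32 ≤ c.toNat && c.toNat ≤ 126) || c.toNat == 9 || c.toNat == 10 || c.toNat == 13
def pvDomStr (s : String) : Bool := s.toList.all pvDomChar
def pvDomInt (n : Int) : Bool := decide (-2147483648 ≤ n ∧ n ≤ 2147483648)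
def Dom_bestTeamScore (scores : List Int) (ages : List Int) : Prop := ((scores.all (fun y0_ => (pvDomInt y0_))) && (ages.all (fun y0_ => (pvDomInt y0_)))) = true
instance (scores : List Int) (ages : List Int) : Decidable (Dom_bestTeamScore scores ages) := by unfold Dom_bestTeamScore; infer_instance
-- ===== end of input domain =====

-- B replaces A's quadratic scan over all previous players by a pruned Pareto
-- frontier of (age, best-chain-score) states queried per player (objective: faster
-- in practice by dominated-state pruning; same worst case).

-- ===== PORT A =====
-- Literal port of A.  All list indices below are Python-valid under Pre_
-- (the `.getD` defaults are never consulted there).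
def bestTeamScore (scores : List Int) (ages : List Int) : Int :=
  let team := (List.range scores.length).map (fun i => (scores.getD i 0, ages.getD i 0))
  let steam := PySem.List.sorted2 team (fun p => p.1) (fun p => p.2) false
  let dp0 := (List.range scores.length).map (fun i => (steam.getD i (0, 0)).1)
  let dpF := (List.range steam.length).foldl
    (fun dp i =>
      let m := steam.getD i (0, 0)
      (List.range i).foldl
        (fun d j =>
          if m.2 ≥ (steam.getD j (0, 0)).2 then
            d.set i (max (d.getD i 0) (m.1 + d.getD j 0))
          else d) dp) dp0
  (PySem.List.max? dpF (fun x => x)).getD 0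

-- ===== PORT B =====
-- Literal port of B (Source B): one pass over the sorted players keeping a pruned
-- frontier of (age, dp) pairs and the running best answer.
def bestTeamScore_alt (scores : List Int) (ages : List Int) : Int :=
  let pairs := PySem.List.sorted2 (List.zip scores ages) (fun p => p.1) (fun p => p.2) false
  let res := pairs.foldl
    (fun (st : List (Int × Int) × Option Int) sa =>
      let fr := st.1
      let q := fr.foldl (fun q p => if p.1 ≤ sa.2 ∧ q < p.2 then p.2 else q) 0
      let dp := sa.1 + q
      let best : Option Int := match st.2 with
        | none => some dp
        | some b => if b < dp then some dp else some b
      let fr' := if q < dp then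
          (fr.filter (fun p => p.1 < sa.2)) ++ [(sa.2, dp)] ++ (fr.filter (fun p => dp < p.2))
        else fr
      (fr', best))
    ([], none)
  res.2.getD 0

-- ===== PRECONDITION & SPEC =====
-- Pre_ excludes exactly the inputs where A raises: empty scores (ValueError from
-- max([])) and ages shorter than scores (IndexError on ages[i]).
def Pre_bestTeamScore (scores : List Int) (ages : List Int) : Prop :=
  scores ≠ [] ∧ scores.length ≤ ages.length
instance (scores : List Int) (ages : List Int) : Decidable (Pre_bestTeamScore scores ages) := by
  unfold Pre_bestTeamScore; infer_instance
def pvWitness_bestTeamScore : List Int × List Int := ([1, 3, 2], [5, 4, 5])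

def Spec_bestTeamScore (scores : List Int) (ages : List Int) (out : Int) : Prop := out = bestTeamScore_alt scores ages
instance (scores : List Int) (ages : List Int) (out : Int) : Decidable (Spec_bestTeamScore scores ages out) := by unfold Spec_bestTeamScore; infer_instance

-- ===== CLAIM (what is proved, stated in full; the proofs are below) =====
def Claim_equal_bestTeamScore : Prop := ∀ (scores : List Int) (ages : List Int), Dom_bestTeamScore scores ages → Pre_bestTeamScore scores ages → Spec_bestTeamScore scores ages (bestTeamScore scores ages)

-- ===== LEMMAS AND PROOFS =====

def qmax (L : List (Int × Int)) (a : Int) : Int :=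
  L.foldl (fun m p => if p.1 ≤ a then max m p.2 else m) 0

-- the (age, dp) pairs of the classic DP over the sorted players
def dps (t : List (Int × Int)) : List (Int × Int) :=
  t.foldl (fun acc sa => acc ++ [(sa.2, sa.1 + qmax acc sa.2)]) []

-- running maximum as an Option (none on [])
def mbest (l : List Int) : Option Int :=
  l.foldl (fun o v => match o with | none => some v | some b => some (max b v)) none

lemma qmax_init (L : List (Int × Int)) (a : Int) :
    ∀ init : Int, 0 ≤ init →
    L.foldl (fun m p => if p.1 ≤ a then max m p.2 else m) init = max init (qmax L a) := by
  induction L with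
  | nil => intro init h; simp [qmax]; omega
  | cons p L ih =>
    intro init h
    simp only [qmax, List.foldl_cons] at *
    by_cases hp : p.1 ≤ a
    · rw [if_pos hp, if_pos hp, ih (max init p.2) (by omega), ih (max 0 p.2) (by omega)]
      omega
    · rw [if_neg hp, if_neg hp, ih init h]

lemma qmax_nonneg (L : List (Int × Int)) (a : Int) : 0 ≤ qmax L a := by
  have := qmax_init L a 0 le_rfl
  simp [qmax] at *; omega

lemma qmax_append (L M : List (Int × Int)) (a : Int) :
    qmax (L ++ M) a = max (qmax L a) (qmax M a) := by
  have h := qmax_init M a (qmax L a) (qmax_nonneg L a)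
  simp only [qmax, List.foldl_append] at *
  omega

lemma le_qmax (L : List (Int × Int)) (a : Int) {p : Int × Int} (hp : p ∈ L) (ha : p.1 ≤ a) :
    p.2 ≤ qmax L a := by
  induction L with
  | nil => simp at hp
  | cons q L ih =>
    have : qmax (q :: L) a = max (qmax [q] a) (qmax L a) := qmax_append [q] L a
    rcases List.mem_cons.mp hp with h | h
    · subst h; simp [qmax, ha] at this ⊢; omega
    · have := ih h; omega

lemma qmax_le (L : List (Int × Int)) (a c : Int) (h0 : 0 ≤ c)
    (h : ∀ p ∈ L, p.1 ≤ a → p.2 ≤ c) : qmax L a ≤ c := by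
  induction L with
  | nil => simp [qmax]; omega
  | cons q L ih =>
    have happ : qmax (q :: L) a = max (qmax [q] a) (qmax L a) := qmax_append [q] L a
    have h1 : qmax [q] a ≤ c := by
      by_cases hq : q.1 ≤ a
      · have := h q (by simp) hq; simp [qmax, hq]; omega
      · simp [qmax, hq]; omega
    have h2 : qmax L a ≤ c := ih (fun p hp => h p (by simp [hp]))
    omega

lemma qmax_mono_subset {L M : List (Int × Int)} (h : ∀ p ∈ L, p ∈ M) (a : Int) :
    qmax L a ≤ qmax M a :=
  qmax_le L a _ (qmax_nonneg M a) (fun p hp hpa => le_qmax M a (h p hp) hpa)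

lemma qmax_mono_arg (L : List (Int × Int)) {a b : Int} (h : a ≤ b) :
    qmax L a ≤ qmax L b :=
  qmax_le L a _ (qmax_nonneg L b) (fun p hp hpa => le_qmax L b hp (le_trans hpa h))

lemma dps_append_singleton (t : List (Int × Int)) (x : Int × Int) :
    dps (t ++ [x]) = dps t ++ [(x.2, x.1 + qmax (dps t) x.2)] := by
  simp [dps, List.foldl_append]

lemma dps_fst (t : List (Int × Int)) : (dps t).map (fun p => p.1) = t.map (fun p => p.2) := by
  induction t using List.reverseRecOn with
  | nil => simp [dps]
  | append_singleton t x ih => simp [dps_append_singleton, ih]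

lemma dps_length (t : List (Int × Int)) : (dps t).length = t.length := by
  have := congrArg List.length (dps_fst t); simpa using this

lemma mbest_append (l : List Int) (v : Int) :
    mbest (l ++ [v]) = some (match mbest l with | none => v | some b => max b v) := by
  simp [mbest, List.foldl_append]
  cases l.foldl (fun o v => match o with | none => some v | some b => some (max b v)) (none : Option Int) <;> simp

lemma mbest_cons (h : Int) (t : List Int) : mbest (h :: t) = some (t.foldl max h) := by
  induction t using List.reverseRecOn with
  | nil => simp [mbest]
  | append_singleton t x ih =>
    rw [show (h :: (t ++ [x])) = ((h :: t) ++ [x]) by simp, mbest_append, ih]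
    simp [List.foldl_append]

lemma max?_eq_mbest (l : List Int) :
    (PySem.List.max? l (fun x => x)).getD 0 = (mbest l).getD 0 := by
  cases l with
  | nil => simp [mbest, PySem.List.max?]
  | cons h t => rw [PySem.List.max?_id_cons, mbest_cons]

lemma qguard_eq (fr : List (Int × Int)) (a : Int) :
    fr.foldl (fun q p => if p.1 ≤ a ∧ q < p.2 then p.2 else q) 0 = qmax fr a := by
  have : (fun (q : Int) (p : Int × Int) => if p.1 ≤ a ∧ q < p.2 then p.2 else q)
       = (fun (m : Int) (p : Int × Int) => if p.1 ≤ a then max m p.2 else m) := by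
    funext q p; by_cases h1 : p.1 ≤ a <;> by_cases h2 : q < p.2 <;> simp [h1, h2] <;> omega
  rw [qmax, this]

lemma frontier_update (fr L : List (Int × Int)) (a dp : Int)
    (H : ∀ x, qmax fr x = qmax L x) (hq : qmax fr a < dp) (x : Int) :
    qmax ((fr.filter (fun p => p.1 < a)) ++ [(a, dp)] ++ (fr.filter (fun p => dp < p.2))) x
      = max (qmax L x) (if a ≤ x then dp else 0) := by
  have hdp : 0 ≤ dp := le_of_lt (lt_of_le_of_lt (qmax_nonneg fr a) hq)
  rw [List.append_assoc, qmax_append, qmax_append]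
  have hsing : qmax [(a, dp)] x = if a ≤ x then dp else 0 := by
    by_cases h : a ≤ x <;> simp [qmax, h] <;> omega
  rw [hsing]
  have h1 : qmax (fr.filter (fun p => p.1 < a)) x ≤ qmax L x := by
    rw [← H]; exact qmax_mono_subset (fun p hp => (List.mem_filter.mp hp).1) x
  have h2 : qmax (fr.filter (fun p => dp < p.2)) x ≤ qmax L x := by
    rw [← H]; exact qmax_mono_subset (fun p hp => (List.mem_filter.mp hp).1) x
  have h3 : qmax L x ≤ max (qmax (fr.filter (fun p => p.1 < a)) x)
      (max (if a ≤ x then dp else 0) (qmax (fr.filter (fun p => dp < p.2)) x)) := by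
    rw [← H]
    refine qmax_le fr x _ ?_ ?_
    · have := qmax_nonneg (fr.filter (fun p => p.1 < a)) x; omega
    · intro p hp hpx
      by_cases hpa : p.1 < a
      · have := le_qmax (fr.filter (fun p => p.1 < a)) x
          (List.mem_filter.mpr ⟨hp, by simp [hpa]⟩) hpx
        omega
      · by_cases hp2 : dp < p.2
        · have := le_qmax (fr.filter (fun p => dp < p.2)) x
            (List.mem_filter.mpr ⟨hp, by simp [hp2]⟩) hpx
          omega
        · have hax : a ≤ x := le_trans (by omega) hpx
          simp [hax]; omega
  omega

def bStep (st : List (Int × Int) × Option Int) (sa : Int × Int) : List (Int × Int) × Option Int :=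
  let fr := st.1
  let q := fr.foldl (fun q p => if p.1 ≤ sa.2 ∧ q < p.2 then p.2 else q) 0
  let dp := sa.1 + q
  let best : Option Int := match st.2 with
    | none => some dp
    | some b => if b < dp then some dp else some b
  let fr' := if q < dp then
      (fr.filter (fun p => p.1 < sa.2)) ++ [(sa.2, dp)] ++ (fr.filter (fun p => dp < p.2))
    else fr
  (fr', best)

lemma B_fold (t : List (Int × Int)) :
    (∀ x, qmax (t.foldl bStep ([], none)).1 x = qmax (dps t) x) ∧
      (t.foldl bStep ([], none)).2 = mbest ((dps t).map (fun p => p.2)) := by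
  induction t using List.reverseRecOn with
  | nil => exact ⟨fun x => rfl, rfl⟩
  | append_singleton t x ih =>
    obtain ⟨ihq, ihb⟩ := ih
    rw [List.foldl_append]
    set S := t.foldl bStep ([], none) with hS
    have hq : S.1.foldl (fun q p => if p.1 ≤ x.2 ∧ q < p.2 then p.2 else q) 0
        = qmax (dps t) x.2 := by rw [qguard_eq]; exact ihq x.2
    simp only [List.foldl_cons, List.foldl_nil, bStep, hq]
    set q := qmax (dps t) x.2 with hqdef
    have hq0 : 0 ≤ q := qmax_nonneg _ _
    constructor
    · intro y
      rw [dps_append_singleton, qmax_append, ← hqdef]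
      have hsing : qmax [(x.2, x.1 + q)] y = if x.2 ≤ y then max 0 (x.1 + q) else 0 := by
        by_cases h : x.2 ≤ y <;> simp [qmax, h]
      rw [hsing]
      by_cases hins : q < x.1 + q
      · rw [if_pos hins]
        rw [frontier_update S.1 (dps t) x.2 (x.1 + q) ihq (by rw [ihq x.2, ← hqdef]; omega) y]
        by_cases h : x.2 ≤ y
        · rw [if_pos h, if_pos h, max_eq_right (by omega : (0:Int) ≤ x.1 + q)]
        · rw [if_neg h, if_neg h]
      · rw [if_neg hins, ihq y]
        have hmono : x.2 ≤ y → q ≤ qmax (dps t) y := fun h => by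
          rw [hqdef]; exact qmax_mono_arg _ h
        have h0 : 0 ≤ qmax (dps t) y := qmax_nonneg _ _
        by_cases h : x.2 ≤ y
        · have := hmono h; rw [if_pos h]; omega
        · rw [if_neg h]; omega
    · rw [dps_append_singleton]
      simp only [List.map_append, List.map_cons, List.map_nil]
      rw [mbest_append, ← ihb, ← hqdef]
      cases S.2 with
      | none => rfl
      | some b =>
        show (if b < x.1 + q then some (x.1 + q) else some b) = some (max b (x.1 + q))
        by_cases h : b < x.1 + q
        · rw [if_pos h, max_eq_right h.le]
        · rw [if_neg h, max_eq_left (by omega)]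

lemma inner_fold_set (s : Int) (C : Nat → Prop) [DecidablePred C] (i : Nat)
    (js : List Nat) (hjs : ∀ j ∈ js, j ≠ i) :
    ∀ d : List Int, i < d.length →
    js.foldl (fun d j => if C j then d.set i (max (d.getD i 0) (s + d.getD j 0)) else d) d
      = d.set i (js.foldl (fun acc j => if C j then max acc (s + d.getD j 0) else acc) (d.getD i 0)) := by
  induction js with
  | nil => intro d hd; simp [List.getD, List.getElem?_eq_getElem hd, List.set_getElem_self]
  | cons j js ih =>
    intro d hd
    have hji : j ≠ i := hjs j (by simp)
    have hjs' : ∀ j ∈ js, j ≠ i := fun j hj => hjs j (by simp [hj])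
    simp only [List.foldl_cons]
    by_cases hc : C j
    · rw [if_pos hc, if_pos hc]
      set v := max (d.getD i 0) (s + d.getD j 0) with hv
      have hlen : i < (d.set i v).length := by simpa using hd
      rw [ih hjs' (d.set i v) hlen]
      have hget : ∀ k, k ≠ i → (d.set i v).getD k 0 = d.getD k 0 := by
        intro k hk
        simp [List.getD, List.getElem?_set_ne (fun h => hk h.symm)]
      have hgeti : (d.set i v).getD i 0 = v := by
        simp [List.getD, hd]
      rw [List.set_set]
      congr 1
      have : ∀ (init : Int), js.foldl (fun acc j => if C j then max acc (s + (d.set i v).getD j 0) else acc) init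
          = js.foldl (fun acc j => if C j then max acc (s + d.getD j 0) else acc) init := by
        intro init
        apply PySem.List.foldl_congr_mem
        intro acc k hk
        rw [hget k (hjs' k hk)]
      rw [this, hgeti]
    · rw [if_neg hc, if_neg hc, ih hjs' d hd]

lemma fold_max_shift (s : Int) (C : Nat → Prop) [DecidablePred C] (f : Nat → Int)
    (js : List Nat) : ∀ init : Int,
    js.foldl (fun acc j => if C j then max acc (s + f j) else acc) (s + init)
      = s + js.foldl (fun acc j => if C j then max acc (f j) else acc) init := by
  induction js with
  | nil => intro init; simp
  | cons j js ih =>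
    intro init
    simp only [List.foldl_cons]
    by_cases hc : C j
    · rw [if_pos hc, if_pos hc, show max (s + init) (s + f j) = s + max init (f j) by omega, ih]
    · rw [if_neg hc, if_neg hc, ih]

lemma fold_range_getD {α β : Type} (L : List α) (dflt : α) (g : β → α → β) (c : β) :
    (List.range L.length).foldl (fun acc j => g acc (L.getD j dflt)) c = L.foldl g c := by
  induction L using List.reverseRecOn generalizing c with
  | nil => simp
  | append_singleton L x ih =>
    rw [List.length_append, List.length_cons, List.length_nil, List.range_succ, List.foldl_append,
      List.foldl_append]
    have hstep : ∀ acc : β, ∀ j < L.length,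
        g acc ((L ++ [x]).getD j dflt) = g acc (L.getD j dflt) := by
      intro acc j hj; rw [List.getD_append _ _ _ _ hj]
    have : (List.range L.length).foldl (fun acc j => g acc ((L ++ [x]).getD j dflt)) c
        = (List.range L.length).foldl (fun acc j => g acc (L.getD j dflt)) c := by
      apply PySem.List.foldl_congr_mem
      intro acc j hj
      exact hstep acc j (List.mem_range.mp hj)
    rw [this, ih]
    simp

lemma map_snd_getD (L : List (Int × Int)) (j : Nat) (hj : j < L.length) :
    (L.map (fun p => p.2)).getD j 0 = (L.getD j (0,0)).2 := by
  rw [List.getD_eq_getElem _ _ (by simpa using hj), List.getD_eq_getElem _ _ hj]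
  simp

lemma map_fst_getD (L : List (Int × Int)) (j : Nat) (hj : j < L.length) :
    (L.map (fun p => p.1)).getD j 0 = (L.getD j (0,0)).1 := by
  rw [List.getD_eq_getElem _ _ (by simpa using hj), List.getD_eq_getElem _ _ hj]
  simp

lemma inner_value (P : List (Int × Int)) (s a : Int) :
    (List.range P.length).foldl
        (fun acc j => if a ≥ (P.getD j (0,0)).1 then max acc (s + (P.getD j (0,0)).2) else acc) s
      = s + qmax P a := by
  have h1 := fold_max_shift s (fun j => a ≥ (P.getD j (0,0)).1) (fun j => (P.getD j (0,0)).2)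
      (List.range P.length) 0
  rw [add_zero] at h1
  rw [h1]
  congr 1
  rw [fold_range_getD P (0,0) (fun m p => if a ≥ p.1 then max m p.2 else m) 0]
  rw [qmax]

def outerBody (steam : List (Int × Int)) (dp : List Int) (i : Nat) : List Int :=
  let m := steam.getD i (0, 0)
  (List.range i).foldl
    (fun d j =>
      if m.2 ≥ (steam.getD j (0, 0)).2 then
        d.set i (max (d.getD i 0) (m.1 + d.getD j 0))
      else d) dp

lemma outerBody_length (t : List (Int × Int)) (d : List Int) (i : Nat) :
    (outerBody t d i).length = d.length := by
  unfold outerBody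
  generalize (List.range i) = js
  induction js generalizing d with
  | nil => rfl
  | cons j js ih =>
    simp only [List.foldl_cons]
    by_cases hc : (t.getD i (0,0)).2 ≥ (t.getD j (0,0)).2
    · rw [if_pos hc, ih]; simp
    · rw [if_neg hc, ih]

lemma outerBody_append (t : List (Int × Int)) (x : Int × Int) (d : List Int) (c : Int)
    (i : Nat) (hi : i < t.length) (hd : d.length = t.length) :
    outerBody (t ++ [x]) (d ++ [c]) i = outerBody t d i ++ [c] := by
  have hid : i < d.length := by omega
  unfold outerBody
  rw [List.getD_append _ _ _ _ hi]
  rw [inner_fold_set _ _ i (List.range i) (fun j hj => by have := List.mem_range.mp hj; omega)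
      (d ++ [c]) (by simp; omega)]
  rw [inner_fold_set _ _ i (List.range i) (fun j hj => by have := List.mem_range.mp hj; omega)
      d hid]
  rw [List.set_append_left _ _ hid]
  congr 1
  rw [List.getD_append _ _ _ _ hid]
  congr 1
  apply PySem.List.foldl_congr_mem
  intro acc j hj
  have hji : j < i := List.mem_range.mp hj
  rw [List.getD_append _ _ _ _ (by omega : j < t.length), List.getD_append _ _ _ _ (by omega : j < d.length)]

lemma fold_outer_append (t : List (Int × Int)) (x : Int × Int) (js : List Nat)
    (hjs : ∀ j ∈ js, j < t.length) :
    ∀ d : List Int, d.length = t.length → ∀ c : Int,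
    js.foldl (outerBody (t ++ [x])) (d ++ [c]) = (js.foldl (outerBody t) d) ++ [c] := by
  induction js with
  | nil => intro d hd c; rfl
  | cons j js ih =>
    intro d hd c
    simp only [List.foldl_cons]
    rw [outerBody_append t x d c j (hjs j (by simp)) hd]
    exact ih (fun j hj => hjs j (by simp [hj])) _ (by rw [outerBody_length]; exact hd) c

lemma A_fold (t : List (Int × Int)) :
    (List.range t.length).foldl (outerBody t) (t.map (fun p => p.1))
      = (dps t).map (fun p => p.2) := by
  induction t using List.reverseRecOn with
  | nil => simp [dps]
  | append_singleton t x ih =>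
    have hn : (t ++ [x]).length = t.length + 1 := by simp
    rw [hn, List.range_succ, List.foldl_append, List.map_append]
    simp only [List.map_cons, List.map_nil, List.foldl_cons, List.foldl_nil]
    rw [fold_outer_append t x (List.range t.length) (fun j hj => List.mem_range.mp hj)
        (t.map (fun p => p.1)) (by simp) x.1]
    rw [ih]
    -- last step: i = t.length
    have hlen : ((dps t).map (fun p => p.2)).length = t.length := by
      simp [dps_length]
    unfold outerBody
    have hx : (t ++ [x]).getD t.length (0,0) = x := by
      rw [List.getD_eq_getElem _ _ (by simp)]
      simp
    rw [hx]
    rw [inner_fold_set _ _ t.length (List.range t.length)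
        (fun j hj => by have := List.mem_range.mp hj; omega)
        _ (by simp [hlen])]
    have hgetn : (((dps t).map (fun p => p.2)) ++ [x.1]).getD t.length 0 = x.1 := by
      rw [List.getD_eq_getElem _ _ (by simp [hlen])]
      rw [List.getElem_append_right (by omega)]
      simp [hlen]
    rw [hgetn]
    have h1 : ∀ j, j < t.length → ((t ++ [x]).getD j (0,0)).2 = ((dps t).getD j (0,0)).1 := by
      intro j hji
      rw [List.getD_append _ _ _ _ hji]
      have ha := map_fst_getD (dps t) j (by rw [dps_length]; exact hji)
      rw [dps_fst] at ha
      rw [← ha, map_snd_getD t j hji]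
    have hcongr : (List.range t.length).foldl
        (fun acc j => if x.2 ≥ ((t ++ [x]).getD j (0,0)).2 then
            max acc (x.1 + ((((dps t).map (fun p => p.2)) ++ [x.1]).getD j 0)) else acc) x.1
        = (List.range (dps t).length).foldl
        (fun acc j => if x.2 ≥ ((dps t).getD j (0,0)).1 then
            max acc (x.1 + ((dps t).getD j (0,0)).2) else acc) x.1 := by
      rw [dps_length]
      apply PySem.List.foldl_congr_mem
      intro acc j hj
      have hji : j < t.length := List.mem_range.mp hj
      have hjm : j < ((dps t).map (fun p => p.2)).length := by
        simpa [dps_length] using hji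
      rw [List.getD_append _ _ _ _ hjm]
      rw [map_snd_getD (dps t) j (by rw [dps_length]; exact hji)]
      rw [h1 j hji]
    rw [hcongr, inner_value (dps t) x.1 x.2]
    rw [List.set_append_right _ _ (by simp [hlen] : ((dps t).map (fun p => p.2)).length ≤ t.length)]
    rw [dps_append_singleton]
    simp [hlen]

lemma team_eq_zip (scores ages : List Int) (h : scores.length ≤ ages.length) :
    (List.range scores.length).map (fun i => (scores.getD i 0, ages.getD i 0))
      = List.zip scores ages := by
  apply List.ext_getElem
  · simp [List.length_zip]; omega
  · intro i h1 h2
    have hi : i < scores.length := by simpa using h1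
    have ha : i < ages.length := by omega
    simp only [List.getElem_map, List.getElem_range, List.getElem_zip]
    rw [List.getD_eq_getElem _ _ hi, List.getD_eq_getElem _ _ ha]

lemma dp0_eq (t : List (Int × Int)) (n : Nat) (hn : t.length = n) :
    (List.range n).map (fun i => (t.getD i (0, 0)).1) = t.map (fun p => p.1) := by
  subst hn
  apply List.ext_getElem
  · simp
  · intro i h1 h2
    simp only [List.getElem_map, List.getElem_range]
    rw [List.getD_eq_getElem _ _ (by simpa using h1)]

theorem ports_agree (scores ages : List Int) (hpre : Pre_bestTeamScore scores ages) :
    bestTeamScore scores ages = bestTeamScore_alt scores ages := by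
  obtain ⟨hne, hlen⟩ := hpre
  have hB : bestTeamScore_alt scores ages
      = ((PySem.List.sorted2 (List.zip scores ages) (fun p => p.1) (fun p => p.2) false).foldl
          bStep ([], none)).2.getD 0 := rfl
  rw [hB]
  simp only [bestTeamScore]
  rw [team_eq_zip scores ages hlen]
  set t := PySem.List.sorted2 (List.zip scores ages) (fun p => p.1) (fun p => p.2) false with ht
  have htlen : t.length = scores.length := by
    rw [ht, (PySem.List.sorted2_perm _ _ _ _).length_eq]
    simp [List.length_zip]; omega
  rw [dp0_eq t scores.length htlen]
  have houter : (fun (dp : List Int) (i : Nat) =>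
      (List.range i).foldl
        (fun d j =>
          if (t.getD i (0, 0)).2 ≥ (t.getD j (0, 0)).2 then
            d.set i (max (d.getD i 0) ((t.getD i (0, 0)).1 + d.getD j 0))
          else d) dp) = outerBody t := rfl
  rw [houter, A_fold t, max?_eq_mbest, (B_fold t).2]

-- ===== VERDICT (by name: the statement is the Claim_ definition above) =====
theorem bestTeamScore_spec : Claim_equal_bestTeamScore := by
  intro scores ages _ hpre
  unfold Spec_bestTeamScore
  exact ports_agree scores ages hpre
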